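-- pv_equiv track=rewrite | github.com/hyunro19/Algorithm | src/py/pg/prbm_hashing/Camouflage.py | solution
-- ===== SOURCE A (Python) =====
-- def solution(clothes):
--     costumes = {}
--     variations = 1
--     for cloth in clothes :
--         costumes[cloth[1]] = costumes.get(cloth[1], 0)+1
--     for count in costumes.values() :
--         variations *= count+1
--     return variations-1
-- ===== SOURCE B (Python) =====
-- def solution(clothes):
--     cats = sorted(c[1] for c in clothes)
--     total, run, prev = 1, 0, None
--     for cat in cats:
--         if cat == prev:
--             run += 1
--         else:
--             total *= run + 1
--             run, prev = 1, cat
--     return total * (run + 1) - 1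
-- ===== Notes on version B (the rewrite author's own statement) =====
-- stated objective: alternative
-- what changed: Replaces the dict-of-counts plus product-over-values with sorting the category list and a single run-length scan that multiplies (run+1) into the accumulator at each category change.
import Mathlib
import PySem

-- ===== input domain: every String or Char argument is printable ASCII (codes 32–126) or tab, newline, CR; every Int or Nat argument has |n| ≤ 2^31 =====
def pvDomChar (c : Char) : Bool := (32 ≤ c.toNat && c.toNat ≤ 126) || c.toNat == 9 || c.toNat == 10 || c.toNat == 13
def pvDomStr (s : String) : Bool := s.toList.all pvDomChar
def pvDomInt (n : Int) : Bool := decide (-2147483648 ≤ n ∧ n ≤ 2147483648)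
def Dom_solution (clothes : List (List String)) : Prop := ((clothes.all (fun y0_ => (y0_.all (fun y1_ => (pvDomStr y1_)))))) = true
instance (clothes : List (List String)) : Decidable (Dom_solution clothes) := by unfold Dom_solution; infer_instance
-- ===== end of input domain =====

-- B replaces A's dict-of-counts + product over values by sort-then-run-length scan (alternative decomposition, same result).

-- ===== PORT A =====
def solution (clothes : List (List String)) : Int :=
  let costumes := clothes.foldl
    (fun d cloth =>
      d.insert (PySem.List.pyGetD cloth 1 "") (d.getD (PySem.List.pyGetD cloth 1 "") 0 + 1))
    (PySem.Dict.empty : PySem.Dict String Int)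
  let variations := costumes.values.foldl (fun v count => v * (count + 1)) 1
  variations - 1

-- ===== PORT B =====
-- one step of B's run-length scan: state (total, run, prev)
def bstep (s : Int × Int × Option String) (cat : String) : Int × Int × Option String :=
  if some cat == s.2.2 then (s.1, s.2.1 + 1, s.2.2)
  else (s.1 * (s.2.1 + 1), 1, some cat)

def solution_alt (clothes : List (List String)) : Int :=
  let cats := PySem.List.sorted (clothes.map (fun c => PySem.List.pyGetD c 1 "")) (fun x => x) false
  let st := cats.foldl bstep (1, 0, none)
  st.1 * (st.2.1 + 1) - 1

-- ===== PRECONDITION & SPEC =====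
-- Pre_ excludes inputs where some cloth has fewer than 2 entries: Python's cloth[1] raises IndexError there.
def Pre_solution (clothes : List (List String)) : Prop := ∀ c ∈ clothes, 2 ≤ c.length
instance (clothes : List (List String)) : Decidable (Pre_solution clothes) := by unfold Pre_solution; infer_instance
def pvWitness_solution : List (List String) := [["hat", "headgear"], ["sunglasses", "eyewear"], ["cap", "headgear"]]

def Spec_solution (clothes : List (List String)) (out : Int) : Prop := out = solution_alt clothes
instance (clothes : List (List String)) (out : Int) : Decidable (Spec_solution clothes out) := by unfold Spec_solution; infer_instance

-- ===== CLAIM (what is proved, stated in full; the proofs are below) =====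
def Claim_equal_solution : Prop := ∀ (clothes : List (List String)), Dom_solution clothes → Pre_solution clothes → Spec_solution clothes (solution clothes)

-- ===== LEMMAS AND PROOFS =====

-- the common value: product of (count k + 1) over the distinct elements of l
def prodCounts (l : List String) : Int :=
  ((PySem.Set.ofList l).map (fun k => (l.count k : Int) + 1)).prod

lemma foldl_mul_succ (l : List Int) (t : Int) :
    l.foldl (fun v c => v * (c + 1)) t = t * (l.map (fun c => c + 1)).prod := by
  induction l generalizing t with
  | nil => simp
  | cons c tl ih => simp [List.foldl_cons, ih, List.prod_cons]; ring

lemma discard_eq_filter (s : List String) (y : String) :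
    PySem.Set.discard s y = s.filter (fun k => k ≠ y) := by
  unfold PySem.Set.discard
  exact List.filter_congr (by intro k _; simp [beq_eq_decide])

lemma ofList_filter_comm (p : String → Bool) (l : List String) :
    PySem.Set.ofList (l.filter p) = (PySem.Set.ofList l).filter p := by
  induction l with
  | nil => rfl
  | cons x l ih =>
    rw [PySem.Set.ofList_cons, discard_eq_filter]
    by_cases hp : p x
    · rw [List.filter_cons_of_pos hp, PySem.Set.ofList_cons, ih, discard_eq_filter,
        List.filter_cons_of_pos hp, List.filter_filter, List.filter_filter]
      congr 1
      exact List.filter_congr (by intro k _; rw [Bool.and_comm])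
    · rw [List.filter_cons_of_neg (by simp [hp]), ih,
        List.filter_cons_of_neg (by simp [hp]), List.filter_filter]
      apply List.filter_congr
      intro k _
      by_cases hk : k = x
      · subst hk; simp [hp]
      · simp [hk]

lemma ofList_filter (tl : List String) (y : String) :
    PySem.Set.ofList (tl.filter (fun k => k ≠ y)) = PySem.Set.discard (PySem.Set.ofList tl) y := by
  rw [discard_eq_filter]; exact ofList_filter_comm _ tl

lemma prodCounts_cons (y : String) (tl : List String) :
    prodCounts (y :: tl) = ((tl.count y : Int) + 1 + 1) * prodCounts (tl.filter (fun k => k ≠ y)) := by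
  unfold prodCounts
  rw [PySem.Set.ofList_cons, List.map_cons, List.prod_cons, List.count_cons_self,
    ofList_filter]
  push_cast
  congr 2
  apply List.map_congr_left
  intro k hk
  rcases (PySem.Set.mem_discard _ _ _).1 hk with ⟨_, hne⟩
  rw [List.count_cons_of_ne (Ne.symm hne), List.count_filter (by simpa using hne)]

-- B's scan result from a completed-run state
def bfin (t r : Int) (p : Option String) (l : List String) : Int :=
  let e := l.foldl bstep (t, r, p)
  e.1 * (e.2.1 + 1)

lemma bfin_some (l : List String) : ∀ (c : String) (t r : Int),
    l.Pairwise (· ≤ ·) → (∀ y ∈ l, c ≤ y) →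
    bfin t r (some c) l = t * ((l.count c : Int) + r + 1) * prodCounts (l.filter (fun k => k ≠ c)) := by
  induction l with
  | nil =>
    intro c t r _ _
    simp [bfin, prodCounts, PySem.Set.ofList]
  | cons y tl ih =>
    intro c t r hpair hle
    have htl : tl.Pairwise (· ≤ ·) := hpair.tail
    have hyle : ∀ z ∈ tl, y ≤ z := fun z hz => (List.pairwise_cons.1 hpair).1 z hz
    by_cases hyc : y = c
    · subst hyc
      have h1 : bfin t r (some y) (y :: tl) = bfin t (r + 1) (some y) tl := by
        simp [bfin, bstep]
      rw [h1, ih y t (r + 1) htl hyle, List.count_cons_self,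
        List.filter_cons_of_neg (by simp)]
      push_cast
      ring
    · have hcy : c < y := lt_of_le_of_ne (hle y (by simp)) (fun h => hyc h.symm)
      have hnc : ∀ z ∈ y :: tl, z ≠ c := by
        intro z hz
        rcases List.mem_cons.1 hz with h | h
        · subst h; exact hyc
        · exact fun he => absurd (hyle z h) (by rw [he]; exact not_le.2 hcy)
      have h1 : bfin t r (some c) (y :: tl) = bfin (t * (r + 1)) 1 (some y) tl := by
        simp [bfin, bstep, hyc]
      have hfilt : List.filter (fun k => decide (k ≠ c)) (y :: tl) = y :: tl :=
        List.filter_eq_self.2 (fun z hz => by simpa using hnc z hz)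
      rw [h1, ih y (t * (r + 1)) 1 htl hyle,
        List.count_eq_zero.2 (fun hc => (hnc c hc) rfl), hfilt, prodCounts_cons]
      ring

lemma bfin_none (l : List String) (t r : Int) (hs : l.Pairwise (· ≤ ·)) :
    bfin t r none l = t * (r + 1) * prodCounts l := by
  cases l with
  | nil => simp [bfin, prodCounts, PySem.Set.ofList]
  | cons y tl =>
    have h1 : bfin t r none (y :: tl) = bfin (t * (r + 1)) 1 (some y) tl := by
      simp [bfin, bstep]
    rw [h1, bfin_some tl y (t * (r + 1)) 1 hs.tail
        (fun z hz => (List.pairwise_cons.1 hs).1 z hz), prodCounts_cons]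
    ring

lemma solution_alt_eq (clothes : List (List String)) :
    solution_alt clothes
      = prodCounts (PySem.List.sorted (clothes.map (fun c => PySem.List.pyGetD c 1 "")) (fun x => x) false) - 1 := by
  unfold solution_alt
  have hs : (PySem.List.sorted (clothes.map (fun c => PySem.List.pyGetD c 1 "")) (fun x => x) false).Pairwise (· ≤ ·) :=
    PySem.List.sorted_pairwise _ _
  have := bfin_none _ 1 0 hs
  simp only [bfin] at this
  simp only []
  rw [this]
  ring

lemma prodCounts_perm {l l' : List String} (h : l.Perm l') : prodCounts l = prodCounts l' := by
  unfold prodCounts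
  rw [List.map_congr_left (fun k _ => by rw [h.count_eq k])]
  apply List.Perm.prod_eq
  apply List.Perm.map
  exact (List.perm_ext_iff_of_nodup (PySem.Set.nodup_ofList _) (PySem.Set.nodup_ofList _)).2
    (fun a => by simp [PySem.Set.mem_ofList, h.mem_iff])

lemma solution_eq (clothes : List (List String)) :
    solution clothes = prodCounts (clothes.map (fun c => PySem.List.pyGetD c 1 "")) - 1 := by
  unfold solution
  rw [show (clothes.foldl
      (fun d cloth =>
        d.insert (PySem.List.pyGetD cloth 1 "") (d.getD (PySem.List.pyGetD cloth 1 "") 0 + 1))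
      (PySem.Dict.empty : PySem.Dict String Int))
      = PySem.Dict.counter (clothes.map (fun c => PySem.List.pyGetD c 1 "")) from by
    rw [← PySem.Dict.foldl_insert_getD_add_one_eq_counter, List.foldl_map]]
  simp only [PySem.Dict.values, PySem.Dict.items_counter, List.map_map, foldl_mul_succ,
    prodCounts]
  simp [Function.comp_def]

-- ===== VERDICT (by name: the statement is the Claim_ definition above) =====
theorem solution_spec : Claim_equal_solution := by
  intro clothes _ _
  unfold Spec_solution
  rw [solution_eq, solution_alt_eq]
  exact congrArg (· - 1) (prodCounts_perm (PySem.List.sorted_perm _ _ _)).symm
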